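-- pv_equiv track=rewrite | github.com/PerrineQhn/XiaoLearn | xiaolearn_game/scripts/generate_regions.py | format_tile_data
-- ===== SOURCE A (Python) =====
-- def cell_key(x, y):
--     """Encode cell coordinates for Godot TileMap format=2."""
--     cx = x & 0xFFFF
--     cy = y & 0xFFFF
--     return cx | (cy << 16)
--
-- def tile_data_triplet(x, y, atlas_tile, source_id=0):
--     """Return 3 ints for one tile entry.
--
--     Godot 4 TileMap format=2 encoding:
--       value 1: cell_x | (cell_y << 16)
--       value 2: source_id | (atlas_x << 16)
--       value 3: atlas_y | (alternative_tile << 16)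
--     """
--     atlas_x, atlas_y = atlas_tile
--     v2 = (source_id & 0xFFFF) | ((atlas_x & 0xFFFF) << 16)
--     v3 = (atlas_y & 0xFFFF)
--     return [cell_key(x, y), v2, v3]
--
-- def format_tile_data(tiles):
--     """Convert list of (x, y, atlas_tuple) to PackedInt32Array string.
--
--     atlas_tuple is (atlas_x, atlas_y).
--     Deduplicates by keeping the last tile placed at each (x,y).
--     """
--     # Deduplicate: last write wins
--     tile_map = {}
--     for entry in tiles:
--         x, y = entry[0], entry[1]
--         atlas = entry[2] if len(entry) > 2 else entry[2]
--         tile_map[(x, y)] = atlas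
--
--     values = []
--     for (x, y), atlas in sorted(tile_map.items()):
--         values.extend(tile_data_triplet(x, y, atlas, 0))
--     return "PackedInt32Array(" + ", ".join(str(v) for v in values) + ")"
-- ===== SOURCE B (Python) =====
-- def format_tile_data(tiles):
--     """Convert list of (x, y, atlas_tuple) to PackedInt32Array string.
--
--     Sort-then-group-scan: one stable sort of the raw entries by cell (x, y),
--     then a single lookahead pass that emits each entry that ends its run of
--     equal cells (stability makes that the last tile placed there), encoding
--     its triplet directly as strings.  No dict/set is built at all.
--     """
--     s = sorted(tiles, key=lambda t: (t[0], t[1]))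
--     kept = _last_of_runs(s)
--     parts = []
--     for x, y, (ax, ay) in kept:
--         parts.append(str((x & 0xFFFF) | ((y & 0xFFFF) << 16)))
--         parts.append(str((ax & 0xFFFF) << 16))
--         parts.append(str(ay & 0xFFFF))
--     return "PackedInt32Array(" + ", ".join(parts) + ")"
--
--
-- def _last_of_runs(s):
--     """Keep the last element of each run of equal (x, y) in a sorted list."""
--     kept = []
--     for i, e in enumerate(s):
--         if i + 1 < len(s) and (s[i + 1][0], s[i + 1][1]) == (e[0], e[1]):
--             continue
--         kept.append(e)
--     return kept
-- ===== Notes on version B (the rewrite author's own statement) =====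
-- stated objective: alternative
-- what changed: Replaces A's dict-based last-write-wins dedup followed by sorting the dict items with a single stable sort of the raw entries by (x,y) and one lookahead group-scan that keeps the last element of each run of equal cells, emitting triplet strings directly; no dict or set is built.
import Mathlib
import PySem

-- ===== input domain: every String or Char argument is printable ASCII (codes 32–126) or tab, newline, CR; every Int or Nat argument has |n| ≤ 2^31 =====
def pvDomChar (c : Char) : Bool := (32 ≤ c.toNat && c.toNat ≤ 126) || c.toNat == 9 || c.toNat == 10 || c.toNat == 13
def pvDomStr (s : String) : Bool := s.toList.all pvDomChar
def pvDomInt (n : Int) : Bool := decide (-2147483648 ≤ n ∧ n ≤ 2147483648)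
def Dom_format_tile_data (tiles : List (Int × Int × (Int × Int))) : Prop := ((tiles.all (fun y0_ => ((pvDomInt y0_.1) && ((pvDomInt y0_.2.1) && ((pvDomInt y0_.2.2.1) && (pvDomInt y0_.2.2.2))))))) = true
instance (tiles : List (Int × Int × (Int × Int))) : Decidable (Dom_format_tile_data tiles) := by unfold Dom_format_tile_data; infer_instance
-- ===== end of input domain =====

-- B replaces A's dict build + sort of its items by ONE stable sort of the raw entries
-- by cell (x, y) followed by a single lookahead group-scan that keeps the last element
-- of each run of equal cells (= last write wins) and emits the triplet strings directly;
-- no dict or set is built (objective: alternative).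

-- ===== PORT A =====
def cell_key (x y : Int) : Int :=
  PySem.Int.bor (PySem.Int.band x 65535) ((PySem.Int.band y 65535) <<< 16)

def tile_data_triplet (x y : Int) (atlas_tile : Int × Int) (source_id : Int) : List Int :=
  [cell_key x y,
   PySem.Int.bor (PySem.Int.band source_id 65535) ((PySem.Int.band atlas_tile.1 65535) <<< 16),
   PySem.Int.band atlas_tile.2 65535]

-- Python compares the (x, y) tuples lexicographically (in A's sorted(tile_map.items())
-- the keys (x, y) are distinct so the atlas part of an item is never compared; B's sort
-- key is lambda t: (t[0], t[1])).  For |x|,|y| ≤ 2^31 (Dom) the integer x*2^33 + y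
-- realises exactly that lexicographic order — exact on Dom.
def encKey (x y : Int) : Int := x * 8589934592 + y

def format_tile_data (tiles : List (Int × Int × (Int × Int))) : String :=
  let tile_map := tiles.foldl (fun d e => d.insert (e.1, e.2.1) e.2.2)
      (PySem.Dict.empty : PySem.Dict (Int × Int) (Int × Int))
  let sortedItems := PySem.List.sorted tile_map.items (fun p => encKey p.1.1 p.1.2) false
  let values := sortedItems.foldl (fun acc p => acc ++ tile_data_triplet p.1.1 p.1.2 p.2 0) []
  "PackedInt32Array(" ++ PySem.Str.join ", " (values.map PySem.Int.toStr) ++ ")"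

-- ===== PORT B =====
-- Source B's _last_of_runs: the index-lookahead loop ("skip unless last of its run of equal
-- (x, y)") written as the obvious structural recursion on adjacent pairs — exact.
def lastOfRuns : List (Int × Int × (Int × Int)) → List (Int × Int × (Int × Int))
  | [] => []
  | [e] => [e]
  | e :: f :: r =>
    if (e.1, e.2.1) = (f.1, f.2.1) then lastOfRuns (f :: r)
    else e :: lastOfRuns (f :: r)

def format_tile_data_alt (tiles : List (Int × Int × (Int × Int))) : String :=
  let s := PySem.List.sorted tiles (fun t => encKey t.1 t.2.1) false
  let kept := lastOfRuns s
  let parts := kept.foldl (fun acc e =>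
      acc ++ [PySem.Int.toStr (PySem.Int.bor (PySem.Int.band e.1 65535) ((PySem.Int.band e.2.1 65535) <<< 16)),
              PySem.Int.toStr ((PySem.Int.band e.2.2.1 65535) <<< 16),
              PySem.Int.toStr (PySem.Int.band e.2.2.2 65535)]) []
  "PackedInt32Array(" ++ PySem.Str.join ", " parts ++ ")"

-- ===== PRECONDITION & SPEC =====
def Spec_format_tile_data (tiles : List (Int × Int × (Int × Int))) (out : String) : Prop := out = format_tile_data_alt tiles
instance (tiles : List (Int × Int × (Int × Int))) (out : String) : Decidable (Spec_format_tile_data tiles out) := by unfold Spec_format_tile_data; infer_instance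

-- ===== CLAIM (what is proved, stated in full; the proofs are below) =====
def Claim_equal_format_tile_data : Prop := ∀ (tiles : List (Int × Int × (Int × Int))), Dom_format_tile_data tiles → Spec_format_tile_data tiles (format_tile_data tiles)

-- ===== LEMMAS AND PROOFS =====

-- the (x, y) cell of an entry
def tkey (e : Int × Int × (Int × Int)) : Int × Int := (e.1, e.2.1)

-- the entry's sort key
def w (e : Int × Int × (Int × Int)) : Int := encKey e.1 e.2.1

-- the last entry of `l` carrying cell k (what the dict's last write keeps)
def lastFind (l : List (Int × Int × (Int × Int))) (k : Int × Int) :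
    Option (Int × Int × (Int × Int)) :=
  l.reverse.find? (fun e => tkey e == k)

-- an entry as the pair A's sorted-items loop sees
def toPair (e : Int × Int × (Int × Int)) : (Int × Int) × (Int × Int) := ((e.1, e.2.1), e.2.2)

-- the lex encoding is injective when the low parts are bounded (Dom)
theorem encKey_inj {x y x' y' : Int}
    (hy : -2147483648 ≤ y ∧ y ≤ 2147483648)
    (hy' : -2147483648 ≤ y' ∧ y' ≤ 2147483648)
    (h : encKey x y = encKey x' y') : x = x' ∧ y = y' := by
  unfold encKey at h; omega

-- dict built by the last-write-wins loop: lookup = last matching entry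
theorem get?_foldl_insert (tiles : List (Int × Int × (Int × Int)))
    (d : PySem.Dict (Int × Int) (Int × Int)) (k : Int × Int) :
    (tiles.foldl (fun d e => d.insert (e.1, e.2.1) e.2.2) d).get? k =
      (match lastFind tiles k with
       | some e => some e.2.2
       | none => d.get? k) := by
  induction tiles using List.reverseRecOn generalizing d with
  | nil => simp [lastFind]
  | append_singleton l e ih =>
    simp only [List.foldl_append, List.foldl_cons, List.foldl_nil, lastFind,
      List.reverse_append, List.reverse_cons, List.reverse_nil, List.nil_append,
      List.cons_append, List.find?_cons]
    by_cases hk : tkey e = k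
    · simp [← hk, tkey]
    · have hne : ¬ k = (e.1, e.2.1) := fun h => hk (by simp [tkey, h])
      have hb' : (tkey e == k) = false := by simpa [tkey] using hk
      simp [hb', hne, PySem.Dict.get?_insert, ih, lastFind]

-- find? = head? of filter
theorem find?_eq_head?_filter {α : Type} (p : α → Bool) (l : List α) :
    l.find? p = (l.filter p).head? := by
  induction l with
  | nil => rfl
  | cons a t ih =>
    by_cases h : p a
    · rw [List.find?_cons_of_pos h, List.filter_cons_of_pos h, List.head?_cons]
    · rw [List.find?_cons_of_neg (by simpa using h), List.filter_cons_of_neg (by simpa using h), ih]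

-- lastFind as the last kept element of the key's filter
theorem lastFind_eq_getLast?_filter (l : List (Int × Int × (Int × Int))) (k : Int × Int) :
    lastFind l k = (l.filter (fun e => tkey e == k)).getLast? := by
  rw [lastFind, find?_eq_head?_filter, List.filter_reverse, List.head?_reverse]

-- STABILITY of PySem's insertion sort: filtering one key value commutes with sorting.
theorem filter_insertBy {α : Type} (key : α → Int) (v : Int) (y : α) (acc : List α)
    (hs : acc.Pairwise (fun a b => key a ≤ key b)) :
    (PySem.List.insertBy (fun a b => decide (key a < key b)) y acc).filter
        (fun e => decide (key e = v)) =
      if key y = v then acc.filter (fun e => decide (key e = v)) ++ [y]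
      else acc.filter (fun e => decide (key e = v)) := by
  induction acc with
  | nil =>
    simp only [PySem.List.insertBy, List.filter_cons, List.filter_nil]
    split_ifs <;> simp_all
  | cons a t ih =>
    have hs' : t.Pairwise (fun a b => key a ≤ key b) := hs.of_cons
    rw [show PySem.List.insertBy (fun a b => decide (key a < key b)) y (a :: t)
        = if decide (key y < key a) then y :: a :: t
          else a :: PySem.List.insertBy (fun a b => decide (key a < key b)) y t from by
      simp [PySem.List.insertBy]]
    by_cases hlt : key y < key a
    · rw [if_pos (by simpa using hlt)]
      by_cases hv : key y = v
      · -- every element of a :: t has key ≥ key a > key y = v: the filter of a :: t is empty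
        have hemp : (a :: t).filter (fun e => decide (key e = v)) = [] := by
          rw [List.filter_eq_nil_iff]
          intro e he
          have hae : key a ≤ key e := by
            rcases List.mem_cons.1 he with rfl | he'
            · exact le_refl _
            · exact List.rel_of_pairwise_cons hs he'
          simp only [decide_eq_true_eq]
          omega
        simp [hv, hemp]
      · simp [List.filter_cons, hv]
    · rw [if_neg (by simpa using hlt)]
      rw [List.filter_cons, List.filter_cons, ih hs']
      split_ifs <;> simp

-- inserting one element = sorting one more element
theorem sorted_append_singleton {α : Type} (key : α → Int) (xs : List α) (y : α) :
    PySem.List.sorted (xs ++ [y]) key false =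
      PySem.List.insertBy (fun a b => decide (key a < key b)) y (PySem.List.sorted xs key false) := by
  rw [PySem.List.sorted_eq_foldl_insertBy, PySem.List.sorted_eq_foldl_insertBy,
    List.foldl_append, List.foldl_cons, List.foldl_nil]

theorem filter_sorted {α : Type} (key : α → Int) (v : Int) (xs : List α) :
    (PySem.List.sorted xs key false).filter (fun e => decide (key e = v)) =
      xs.filter (fun e => decide (key e = v)) := by
  induction xs using List.reverseRecOn with
  | nil => simp [PySem.List.sorted]
  | append_singleton l y ih =>
    rw [sorted_append_singleton,
      filter_insertBy key v y _ (PySem.List.sorted_pairwise l key),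
      List.filter_append, ih]
    split_ifs with h <;> simp [h]

-- lastOfRuns is a sublist of its argument
theorem lastOfRuns_subset (s : List (Int × Int × (Int × Int))) :
    ∀ x ∈ lastOfRuns s, x ∈ s := by
  induction s with
  | nil => simp [lastOfRuns]
  | cons e t ih =>
    cases t with
    | nil => simp [lastOfRuns]
    | cons f r =>
      intro x hx
      rw [lastOfRuns] at hx
      split_ifs at hx with h
      · exact List.mem_cons_of_mem e (ih x hx)
      · rcases List.mem_cons.1 hx with rfl | hx'
        · exact List.mem_cons_self
        · exact List.mem_cons_of_mem e (ih x hx')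

-- the expansion of lastFind at a cons
theorem lastFind_cons (e : Int × Int × (Int × Int)) (l : List (Int × Int × (Int × Int)))
    (k : Int × Int) :
    lastFind (e :: l) k =
      (match lastFind l k with
       | some y => some y
       | none => if tkey e == k then some e else none) := by
  rw [lastFind, lastFind, List.reverse_cons, List.find?_append]
  cases l.reverse.find? (fun e => tkey e == k) with
  | none =>
    by_cases h : tkey e = k
    · simp [List.find?, h]
    · simp [List.find?, beq_eq_false_iff_ne.2 h]
  | some y => simp

-- in a key-sorted list (keys injective on members) lastOfRuns keeps exactly the
-- last entry of each cell
theorem mem_lastOfRuns (s : List (Int × Int × (Int × Int)))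
    (hs : s.Pairwise (fun a b => w a ≤ w b))
    (hinj : ∀ a ∈ s, ∀ b ∈ s, w a = w b → tkey a = tkey b)
    (x : Int × Int × (Int × Int)) :
    x ∈ lastOfRuns s ↔ lastFind s (tkey x) = some x := by
  induction s with
  | nil => simp [lastOfRuns, lastFind]
  | cons e t ih =>
    cases t with
    | nil =>
      simp only [lastOfRuns, List.mem_singleton, lastFind, List.reverse_cons,
        List.reverse_nil, List.nil_append, List.find?_cons, List.find?_nil]
      constructor
      · rintro rfl; simp
      · intro h
        by_cases hk : (tkey e == tkey x) = true <;> simp [hk] at h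
        exact h.symm
    | cons f r =>
      have hs' : (f :: r).Pairwise (fun a b => w a ≤ w b) := hs.of_cons
      have hinj' : ∀ a ∈ f :: r, ∀ b ∈ f :: r, w a = w b → tkey a = tkey b :=
        fun a ha b hb => hinj a (List.mem_cons_of_mem e ha) b (List.mem_cons_of_mem e hb)
      have ih' := ih hs' hinj'
      have hef : w e ≤ w f := List.rel_of_pairwise_cons hs List.mem_cons_self
      rw [lastOfRuns, lastFind_cons]
      by_cases hk : (e.1, e.2.1) = (f.1, f.2.1)
      · rw [if_pos hk, ih']
        cases hlf : lastFind (f :: r) (tkey x) with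
        | some y => simp
        | none =>
          have hfn : tkey f ≠ tkey x := by
            intro hfx
            have hmem : f ∈ (f :: r).reverse := by simp
            have := List.find?_eq_none.1 hlf f hmem
            simp [hfx] at this
          have hen : (tkey e == tkey x) = false := by
            have hte : tkey e = tkey f := hk
            rw [beq_eq_false_iff_ne, hte]
            exact hfn
          simp [hen]
      · rw [if_neg hk]
        have hwlt : ∀ y ∈ f :: r, w e < w y := by
          intro y hy
          have hle : w e ≤ w y := List.rel_of_pairwise_cons hs hy
          have hfy : w f ≤ w y := by
            rcases List.mem_cons.1 hy with rfl | hy'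
            · exact le_refl _
            · exact List.rel_of_pairwise_cons hs' hy'
          rcases lt_or_eq_of_le hle with h | h
          · exact h
          · have hef' : w e = w f := by omega
            exact absurd (hinj e List.mem_cons_self f
              (List.mem_cons_of_mem e List.mem_cons_self) hef') hk
        have hnone : lastFind (f :: r) (tkey e) = none := by
          rw [lastFind, List.find?_eq_none]
          intro y hy
          have hym : y ∈ f :: r := List.mem_reverse.1 hy
          simp only [beq_iff_eq]
          intro hye
          have hwy : w y = w e := by
            show encKey y.1 y.2.1 = encKey e.1 e.2.1
            have h1 : y.1 = e.1 := congrArg (fun p : Int × Int => p.1) hye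
            have h2 : y.2.1 = e.2.1 := congrArg (fun p : Int × Int => p.2) hye
            rw [h1, h2]
          exact absurd hwy (ne_of_gt (hwlt y hym))
        constructor
        · intro hx
          rcases List.mem_cons.1 hx with rfl | hx'
          · rw [hnone]
            simp
          · rw [ih'.1 hx']
        · intro h
          cases hlf : lastFind (f :: r) (tkey x) with
          | some y =>
            rw [hlf] at h
            simp only [Option.some.injEq] at h
            exact List.mem_cons_of_mem e (ih'.2 (by rw [hlf, h]))
          | none =>
            rw [hlf] at h
            by_cases hk' : (tkey e == tkey x) = true <;> simp [hk'] at h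
            rw [← h]
            exact List.mem_cons_self

-- lastOfRuns of a key-sorted list is strictly increasing on the key
theorem pairwise_lt_lastOfRuns (s : List (Int × Int × (Int × Int)))
    (hs : s.Pairwise (fun a b => w a ≤ w b))
    (hinj : ∀ a ∈ s, ∀ b ∈ s, w a = w b → tkey a = tkey b) :
    (lastOfRuns s).Pairwise (fun a b => w a < w b) := by
  induction s with
  | nil => simp [lastOfRuns]
  | cons e t ih =>
    cases t with
    | nil => simp [lastOfRuns]
    | cons f r =>
      have hs' : (f :: r).Pairwise (fun a b => w a ≤ w b) := hs.of_cons
      have hinj' : ∀ a ∈ f :: r, ∀ b ∈ f :: r, w a = w b → tkey a = tkey b :=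
        fun a ha b hb => hinj a (List.mem_cons_of_mem e ha) b (List.mem_cons_of_mem e hb)
      have hef : w e ≤ w f := List.rel_of_pairwise_cons hs List.mem_cons_self
      rw [lastOfRuns]
      split_ifs with hk
      · exact ih hs' hinj'
      · refine List.Pairwise.cons ?_ (ih hs' hinj')
        intro y hy
        have hym : y ∈ f :: r := lastOfRuns_subset _ y hy
        have hle : w e ≤ w y := List.rel_of_pairwise_cons hs hym
        have hfy : w f ≤ w y := by
          rcases List.mem_cons.1 hym with rfl | hy'
          · exact le_refl _
          · exact List.rel_of_pairwise_cons hs' hy'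
        rcases lt_or_eq_of_le hle with h | h
        · exact h
        · have hef' : w e = w f := by omega
          exact absurd (hinj e List.mem_cons_self f
            (List.mem_cons_of_mem e List.mem_cons_self) hef') hk

theorem format_tile_data_eq_alt (tiles : List (Int × Int × (Int × Int)))
    (hdom : Dom_format_tile_data tiles) :
    format_tile_data tiles = format_tile_data_alt tiles := by
  -- bounds from Dom
  have hbound : ∀ e ∈ tiles, (-2147483648 ≤ e.1 ∧ e.1 ≤ 2147483648) ∧
      (-2147483648 ≤ e.2.1 ∧ e.2.1 ≤ 2147483648) := by
    intro e he
    have := (List.all_eq_true.1 hdom) e he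
    simp [pvDomInt] at this
    exact ⟨this.1, this.2.1⟩
  unfold format_tile_data format_tile_data_alt
  dsimp only
  set d := tiles.foldl (fun d e => d.insert (e.1, e.2.1) e.2.2)
      (PySem.Dict.empty : PySem.Dict (Int × Int) (Int × Int)) with hd
  set s := PySem.List.sorted tiles (fun t => encKey t.1 t.2.1) false with hsdef
  have hsmem : ∀ x, x ∈ s ↔ x ∈ tiles := fun x => PySem.List.mem_sorted tiles (fun t => encKey t.1 t.2.1) false x
  have hsle : s.Pairwise (fun a b => w a ≤ w b) :=
    PySem.List.sorted_pairwise tiles (fun t => encKey t.1 t.2.1)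
  have hinj : ∀ a ∈ s, ∀ b ∈ s, w a = w b → tkey a = tkey b := by
    intro a ha b hb hw
    have hba := hbound a ((hsmem a).1 ha)
    have hbb := hbound b ((hsmem b).1 hb)
    have hx := encKey_inj hba.2 hbb.2 hw
    show (a.1, a.2.1) = (b.1, b.2.1)
    rw [hx.1, hx.2]
  -- within Dom, matching a cell = matching its encoded key, pointwise on tiles' members
  have hfix : ∀ (l : List (Int × Int × (Int × Int))), (∀ x ∈ l, x ∈ tiles) →
      ∀ z ∈ tiles,
      l.filter (fun e => tkey e == tkey z) =
        l.filter (fun e => decide (encKey e.1 e.2.1 = encKey z.1 z.2.1)) := by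
    intro l hl z hz
    apply List.filter_congr
    intro e he
    have hbe := hbound e (hl e he)
    have hbz := hbound z hz
    by_cases h : tkey e = tkey z
    · have henc : encKey e.1 e.2.1 = encKey z.1 z.2.1 := by
        have h1 : e.1 = z.1 := congrArg (fun p : Int × Int => p.1) h
        have h2 : e.2.1 = z.2.1 := congrArg (fun p : Int × Int => p.2) h
        rw [h1, h2]
      simp [h, henc]
    · have henc : encKey e.1 e.2.1 ≠ encKey z.1 z.2.1 := by
        intro heq
        have hxy := encKey_inj hbe.2 hbz.2 heq
        exact h (show (e.1, e.2.1) = (z.1, z.2.1) by rw [hxy.1, hxy.2])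
      simp [h, henc]
  -- stability: the last entry of a cell is the same in tiles and in the sorted list
  have hlastFind : ∀ z ∈ tiles, lastFind s (tkey z) = lastFind tiles (tkey z) := by
    intro z hz
    rw [lastFind_eq_getLast?_filter, lastFind_eq_getLast?_filter,
      hfix s (fun x hx => (hsmem x).1 hx) z hz, hfix tiles (fun _ h => h) z hz, hsdef]
    rw [filter_sorted (fun t : Int × Int × (Int × Int) => encKey t.1 t.2.1) (encKey z.1 z.2.1) tiles]
  set L := lastOfRuns s with hL
  -- membership characterisations
  have hkeysnd : d.keys.Nodup :=
    PySem.Dict.nodup_keys_foldl_insert_key tiles (fun e => (e.1, e.2.1)) (fun _ e => e.2.2)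
      PySem.Dict.empty PySem.Dict.nodup_keys_empty
  have hitems : ∀ p : (Int × Int) × (Int × Int),
      p ∈ d.items ↔ (match lastFind tiles p.1 with
        | some e => some e.2.2
        | none => none) = some p.2 := by
    intro p
    rw [← PySem.Dict.get?_eq_some_iff_mem_items d p.1 p.2 hkeysnd, hd, get?_foldl_insert]
    cases lastFind tiles p.1 <;> simp
  have hLmem : ∀ x, x ∈ L ↔ lastFind tiles (tkey x) = some x := by
    intro x
    rw [hL, mem_lastOfRuns s hsle hinj]
    constructor
    · intro h
      have hxs : x ∈ s := List.mem_reverse.1 (List.mem_of_find?_eq_some h)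
      rw [← hlastFind x ((hsmem x).1 hxs)]
      exact h
    · intro h
      have hxt : x ∈ tiles := List.mem_reverse.1 (List.mem_of_find?_eq_some h)
      rw [hlastFind x hxt]
      exact h
  have hLlt : L.Pairwise (fun a b => w a < w b) := pairwise_lt_lastOfRuns s hsle hinj
  have hLnd : (L.map tkey).Nodup := by
    rw [List.Nodup, List.pairwise_map]
    refine hLlt.imp ?_
    intro a b hab heq
    have hwab : w a = w b := by
      show encKey a.1 a.2.1 = encKey b.1 b.2.1
      have h1 : a.1 = b.1 := congrArg (fun p : Int × Int => p.1) heq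
      have h2 : a.2.1 = b.2.1 := congrArg (fun p : Int × Int => p.2) heq
      rw [h1, h2]
    exact absurd hwab (ne_of_lt hab)
  have hkepttiles : ∀ x ∈ L, x ∈ tiles := fun x hx =>
    (hsmem x).1 (lastOfRuns_subset s x hx)
  -- the kept entries are exactly the dict items
  have hmemeq : ∀ p, p ∈ L.map toPair ↔ p ∈ d.items := by
    intro p
    rw [hitems, List.mem_map]
    constructor
    · rintro ⟨e, he, rfl⟩
      have hlf := (hLmem e).1 he
      have : tkey e = (toPair e).1 := rfl
      rw [← this, hlf]
      rfl
    · intro h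
      rcases hfe : lastFind tiles p.1 with _ | e
      · rw [hfe] at h; simp at h
      · rw [hfe] at h; simp at h
        have hke : tkey e = p.1 := by
          have := List.find?_some hfe
          simpa using this
        refine ⟨e, (hLmem e).2 (by rw [hke]; exact hfe), ?_⟩
        show (tkey e, e.2.2) = p
        rw [hke, h]
  have hperm : (L.map toPair).Perm d.items := by
    rw [List.perm_ext_iff_of_nodup ?h1 ?h2]
    · exact hmemeq
    case h1 =>
      have hmm : (L.map toPair).map (·.1) = L.map tkey := by
        rw [List.map_map]; rfl
      exact List.Nodup.of_map _ (hmm ▸ hLnd)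
    case h2 =>
      have hmm : d.items.map (·.1) = d.keys := rfl
      exact List.Nodup.of_map _ (hmm ▸ hkeysnd)
  -- hence A's sorted dict items are exactly B's kept entries
  have hsorted : PySem.List.sorted d.items (fun p => encKey p.1.1 p.1.2) false = L.map toPair := by
    apply PySem.List.sorted_eq_of_perm_of_pairwise_lt
    · exact hperm
    · rw [List.pairwise_map]
      exact hLlt
  rw [hsorted]
  -- emitted values coincide triplet by triplet
  rw [PySem.List.foldl_append_eq_flatMap, PySem.List.foldl_append_eq_flatMap]
  simp only [List.nil_append]
  congr 1
  have bor0 : ∀ z : Int, PySem.Int.bor (PySem.Int.band 0 65535) z = z := by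
    intro z
    rw [show PySem.Int.band 0 65535 = 0 by decide, PySem.Int.bor_comm, PySem.Int.bor_zero]
  simp [List.map_flatMap, List.flatMap_map, tile_data_triplet, toPair, cell_key, bor0]

-- ===== VERDICT (by name: the statement is the Claim_ definition above) =====
theorem format_tile_data_spec : Claim_equal_format_tile_data := by
  intro tiles hdom
  show format_tile_data tiles = format_tile_data_alt tiles
  exact format_tile_data_eq_alt tiles hdom
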